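-- pv_equiv track=rewrite | github.com/israa85/2048-game | game/board.py | _collapse_line
-- ===== SOURCE A (Python) =====
-- from typing import List, Tuple, Dict, Optional, Iterable
--
-- def _collapse_line(line: List[int]) -> List[int]:
--     """Collapse a line (merge and slide), returns new line with same length."""
--     # Filter out zeros
--     filtered = [x for x in line if x != 0]
--
--     # Merge adjacent equal values
--     merged = []
--     i = 0
--     while i < len(filtered):
--         if i + 1 < len(filtered) and filtered[i] == filtered[i + 1]:
--             merged.append(filtered[i] * 2)
--             i += 2
--         else:
--             merged.append(filtered[i])
--             i += 1
--
--     # Pad with zeros to original length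
--     return merged + [0] * (len(line) - len(merged))
-- ===== SOURCE B (Python) =====
-- from typing import List
--
-- def _collapse_line(line: List[int]) -> List[int]:
--     """Collapse a line (merge and slide), returns new line with same length."""
--     acc: List[int] = []
--     last_merged = False
--     for x in line:
--         if x != 0:
--             if acc and acc[-1] == x and not last_merged:
--                 acc[-1] = x * 2
--                 last_merged = True
--             else:
--                 acc.append(x)
--                 last_merged = False
--     return acc + [0] * (len(line) - len(acc))
-- ===== Notes on version B (the rewrite author's own statement) =====
-- stated objective: simpler
-- what changed: Replaced A's three phases (zero-filter pass, index-skipping while-loop over the filtered list, pad) by a single fold over the original line maintaining a stack and a last-merged flag, skipping zeros inline.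
import Mathlib
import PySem

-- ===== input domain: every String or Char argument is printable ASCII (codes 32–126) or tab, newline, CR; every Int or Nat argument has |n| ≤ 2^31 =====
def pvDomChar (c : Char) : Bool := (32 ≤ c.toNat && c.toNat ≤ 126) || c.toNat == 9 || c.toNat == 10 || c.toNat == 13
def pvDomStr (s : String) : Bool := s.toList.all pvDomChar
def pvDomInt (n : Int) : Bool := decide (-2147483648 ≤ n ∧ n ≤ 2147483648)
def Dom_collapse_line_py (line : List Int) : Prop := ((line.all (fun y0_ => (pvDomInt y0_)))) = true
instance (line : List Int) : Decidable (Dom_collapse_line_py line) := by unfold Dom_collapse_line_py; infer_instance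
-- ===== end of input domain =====

-- B replaces A's filter-then-index-merge-then-pad phases with one fold over the
-- original line using a stack plus a last-merged flag (objective: simpler).

-- ===== PORT A =====
-- the while-loop over indices of `filtered`: consumes two equal leading
-- elements (i += 2) or one element (i += 1), exactly as A's index jumps do
def mergeLoopA : List Int → List Int
  | a :: b :: rest => if a = b then a * 2 :: mergeLoopA rest else a :: mergeLoopA (b :: rest)
  | [a] => [a]
  | [] => []

def collapse_line_py (line : List Int) : List Int :=
  let filtered := line.filter (fun x => x != 0)
  let merged := mergeLoopA filtered
  merged ++ List.replicate (line.length - merged.length) 0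

-- ===== PORT B =====
-- one iteration of B's for-loop body, over state (acc, last_merged)
def altStep (s : List Int × Bool) (x : Int) : List Int × Bool :=
  if x = 0 then s
  else if s.1.getLast? = some x ∧ s.2 = false then (s.1.dropLast ++ [x * 2], true)
  else (s.1 ++ [x], false)

def collapse_line_py_alt (line : List Int) : List Int :=
  let s := line.foldl altStep ([], false)
  s.1 ++ List.replicate (line.length - s.1.length) 0

-- ===== PRECONDITION & SPEC =====
def Spec_collapse_line_py (line : List Int) (out : List Int) : Prop := out = collapse_line_py_alt line
instance (line : List Int) (out : List Int) : Decidable (Spec_collapse_line_py line out) := by unfold Spec_collapse_line_py; infer_instance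

-- ===== CLAIM (what is proved, stated in full; the proofs are below) =====
def Claim_equal_collapse_line_py : Prop := ∀ (line : List Int), Dom_collapse_line_py line → Spec_collapse_line_py line (collapse_line_py line)

-- ===== LEMMAS AND PROOFS =====

theorem altStep_zero (s : List Int × Bool) : altStep s 0 = s := by
  simp [altStep]

theorem altStep_push (s : List Int × Bool) (x : Int) (hx : x ≠ 0)
    (hc : ¬(s.1.getLast? = some x ∧ s.2 = false)) : altStep s x = (s.1 ++ [x], false) := by
  unfold altStep; rw [if_neg hx, if_neg hc]

theorem altStep_merge (s : List Int × Bool) (x : Int) (hx : x ≠ 0)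
    (hc : s.1.getLast? = some x) (hf : s.2 = false) :
    altStep s x = (s.1.dropLast ++ [x * 2], true) := by
  unfold altStep; rw [if_neg hx, if_pos ⟨hc, hf⟩]

-- zeros are skipped inline: folding over the line equals folding over its nonzeros
theorem foldl_altStep_filter (l : List Int) (s : List Int × Bool) :
    List.foldl altStep s l = List.foldl altStep s (l.filter (fun x => x != 0)) := by
  induction l generalizing s with
  | nil => rfl
  | cons x xs ih =>
      by_cases hx : x = 0
      · subst hx
        simp [altStep_zero, List.foldl_cons, ih]
      · have hb : (x != 0) = true := by simpa using hx
        simp [hb, List.foldl_cons, ih]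

-- key invariant of B's loop, both flag shapes at once
theorem foldl_altStep_merge_inv (l : List Int) (h : ∀ x ∈ l, x ≠ 0) :
    (∀ acc c, (List.foldl altStep (acc ++ [c], true) l).1 = acc ++ [c] ++ mergeLoopA l) ∧
    (∀ acc a, (List.foldl altStep (acc ++ [a], false) l).1 = acc ++ mergeLoopA (a :: l)) := by
  induction l with
  | nil => simp [mergeLoopA]
  | cons x xs ih =>
      have hx : x ≠ 0 := h x (by simp)
      have ih' := ih (fun y hy => h y (List.mem_cons_of_mem _ hy))
      constructor
      · intro acc c
        have hstep : altStep (acc ++ [c], true) x = (acc ++ [c] ++ [x], false) :=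
          altStep_push _ _ hx (by simp)
        rw [List.foldl_cons, hstep, ih'.2 (acc ++ [c]) x]
      · intro acc a
        by_cases hxa : x = a
        · subst hxa
          have hstep : altStep (acc ++ [x], false) x = (acc ++ [x * 2], true) := by
            rw [altStep_merge _ _ hx (by simp) rfl]
            simp
          rw [List.foldl_cons, hstep, ih'.1 acc (x * 2)]
          simp [mergeLoopA, List.append_assoc]
        · have hstep : altStep (acc ++ [a], false) x = (acc ++ [a] ++ [x], false) := by
            refine altStep_push _ _ hx ?_
            simp only [List.getLast?_concat]
            exact fun hc => hxa (Option.some.inj hc.1).symm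
          rw [List.foldl_cons, hstep, ih'.2 (acc ++ [a]) x]
          simp [mergeLoopA, List.append_assoc]
          intro he
          exact absurd he.symm hxa

theorem foldl_altStep_eq_mergeLoopA (line : List Int) :
    (List.foldl altStep ([], false) line).1 = mergeLoopA (line.filter (fun x => x != 0)) := by
  rw [foldl_altStep_filter]
  have hnz : ∀ x ∈ line.filter (fun x => x != 0), x ≠ 0 := by
    intro x hx
    have := List.of_mem_filter hx
    simpa using this
  cases hf : line.filter (fun x => x != 0) with
  | nil => simp [mergeLoopA]
  | cons a rest =>
      have hnz' : ∀ x ∈ rest, x ≠ 0 := fun x hx => hnz x (by rw [hf]; exact List.mem_cons_of_mem _ hx)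
      have ha : a ≠ 0 := hnz a (by rw [hf]; simp)
      have hstep : altStep ([], false) a = (([] : List Int) ++ [a], false) :=
        altStep_push _ _ ha (by simp)
      rw [List.foldl_cons, hstep, (foldl_altStep_merge_inv rest hnz').2 [] a]
      simp

-- ===== VERDICT (by name: the statement is the Claim_ definition above) =====
theorem collapse_line_py_spec : Claim_equal_collapse_line_py := by
  intro line _
  show collapse_line_py line = collapse_line_py_alt line
  simp only [collapse_line_py, collapse_line_py_alt]
  rw [foldl_altStep_eq_mergeLoopA]
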